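-- pv_equiv track=rewrite | github.com/Ryles1/AdventofCode | 2015/day11.py | has_pairs
-- ===== SOURCE A (Python) =====
-- def has_pairs(s):
--     num_pairs = 0
--     i = 0
--     while i < len(s) - 1:
--         window = s[i: i+2]
--         if window[0] == window[1]:
--             num_pairs += 1
--             i += 2
--         else:
--             i += 1
--         if num_pairs == 2:
--             break
--     return num_pairs >= 2
-- ===== SOURCE B (Python) =====
-- def has_pairs(s):
--     # find the first adjacent equal pair, then look for any later, non-overlapping one
--     first = next((i for i in range(len(s) - 1) if s[i] == s[i + 1]), None)
--     if first is None:
--         return False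
--     return any(s[j] == s[j + 1] for j in range(first + 2, len(s) - 1))
-- ===== Notes on version B (the rewrite author's own statement) =====
-- stated objective: simpler
-- what changed: A's greedy counter loop with mixed step sizes and a break is replaced by two plain scans: find the first adjacent equal pair, then check for any pair starting at least two positions later.
import Mathlib
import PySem

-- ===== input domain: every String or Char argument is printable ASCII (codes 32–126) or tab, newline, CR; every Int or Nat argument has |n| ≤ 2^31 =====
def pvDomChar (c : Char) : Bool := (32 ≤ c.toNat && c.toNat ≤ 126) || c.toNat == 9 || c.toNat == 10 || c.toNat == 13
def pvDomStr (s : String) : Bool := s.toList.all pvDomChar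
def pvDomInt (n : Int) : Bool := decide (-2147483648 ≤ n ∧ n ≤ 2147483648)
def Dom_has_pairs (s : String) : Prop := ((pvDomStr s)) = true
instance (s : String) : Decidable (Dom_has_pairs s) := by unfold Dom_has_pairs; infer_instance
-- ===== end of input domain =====

-- B replaces A's greedy counting loop with a first-pair scan followed by a scan for any
-- later non-overlapping pair (objective: simpler; same O(n) cost).

-- ===== PORT A =====
-- A's while loop: i advances by 2 past a pair (counting it) else by 1; break at 2 pairs.
def hasPairsLoopA (l : List Char) (i np : Nat) : Bool :=
  if i < l.length - 1 then
    let window := PySem.List.slice l (some (i : Int)) (some ((i : Int) + 2))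
    if PySem.List.pyGet? window 0 == PySem.List.pyGet? window 1 then
      if np + 1 == 2 then decide (np + 1 ≥ 2)
      else hasPairsLoopA l (i + 2) (np + 1)
    else
      if np == 2 then decide (np ≥ 2)
      else hasPairsLoopA l (i + 1) np
  else decide (np ≥ 2)
termination_by l.length - i
decreasing_by all_goals omega

def has_pairs (s : String) : Bool := hasPairsLoopA s.toList 0 0

-- ===== PORT B =====
-- next((i for i in range(len(s)-1) if s[i]==s[i+1]), None)
def firstPairB (l : List Char) (i : Nat) : Option Nat :=
  if i < l.length - 1 then
    if PySem.List.pyGet? l (i : Int) == PySem.List.pyGet? l ((i : Int) + 1) then some i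
    else firstPairB l (i + 1)
  else none
termination_by l.length - i
decreasing_by omega

-- any(s[j]==s[j+1] for j in range(first+2, len(s)-1))
def anyPairB (l : List Char) (j : Nat) : Bool :=
  if j < l.length - 1 then
    if PySem.List.pyGet? l (j : Int) == PySem.List.pyGet? l ((j : Int) + 1) then true
    else anyPairB l (j + 1)
  else false
termination_by l.length - j
decreasing_by omega

def has_pairs_alt (s : String) : Bool :=
  match firstPairB s.toList 0 with
  | none => false
  | some i => anyPairB s.toList (i + 2)

-- ===== PRECONDITION & SPEC =====
def Spec_has_pairs (s : String) (out : Bool) : Prop := out = has_pairs_alt s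
instance (s : String) (out : Bool) : Decidable (Spec_has_pairs s out) := by unfold Spec_has_pairs; infer_instance

-- ===== CLAIM (what is proved, stated in full; the proofs are below) =====
def Claim_equal_has_pairs : Prop := ∀ (s : String), Dom_has_pairs s → Spec_has_pairs s (has_pairs s)

-- ===== LEMMAS AND PROOFS =====

-- A's window test at i equals B's direct pair test at i (both in range under the loop guard).
lemma cond_eq (l : List Char) (i : Nat) (h : i + 1 < l.length) :
    (PySem.List.pyGet? (PySem.List.slice l (some (i : Int)) (some ((i : Int) + 2))) 0 ==
      PySem.List.pyGet? (PySem.List.slice l (some (i : Int)) (some ((i : Int) + 2))) 1) =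
    (PySem.List.pyGet? l (i : Int) == PySem.List.pyGet? l ((i : Int) + 1)) := by
  have h2 : (i : Int) + 2 = ((i + 2 : Nat) : Int) := by push_cast; ring
  have h1 : (i : Int) + 1 = ((i + 1 : Nat) : Int) := by push_cast; ring
  rw [h2, h1, PySem.List.slice_natCast, PySem.List.pyGet?_zero, PySem.List.pyGet?_natCast,
    PySem.List.pyGet?_natCast]
  have he : i + 2 - i = 2 := by omega
  rw [he]
  have hlt : 1 < l.length - i := by omega
  simp [PySem.List.pyGet?, PySem.List.pyIdx?, hlt, h, Nat.lt_of_succ_lt h]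

-- A's loop after its first pair (np = 1) is exactly B's second scan.
lemma loopA_one (l : List Char) (i : Nat) : hasPairsLoopA l i 1 = anyPairB l i := by
  unfold hasPairsLoopA anyPairB
  by_cases h : i < l.length - 1
  · rw [if_pos h, if_pos h]
    simp only []
    rw [cond_eq l i (by omega)]
    by_cases hc : (PySem.List.pyGet? l (i : Int) == PySem.List.pyGet? l ((i : Int) + 1)) = true
    · rw [if_pos hc, if_pos hc]
      norm_num
    · rw [if_neg hc, if_neg hc]
      norm_num
      exact loopA_one l (i + 1)
  · simp [h]
termination_by l.length - i
decreasing_by omega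

-- A's loop before any pair (np = 0) is B's first scan followed by the second.
lemma loopA_zero (l : List Char) (i : Nat) :
    hasPairsLoopA l i 0 =
      (match firstPairB l i with
       | none => false
       | some k => anyPairB l (k + 2)) := by
  unfold hasPairsLoopA firstPairB
  by_cases h : i < l.length - 1
  · rw [if_pos h, if_pos h]
    simp only []
    rw [cond_eq l i (by omega)]
    by_cases hc : (PySem.List.pyGet? l (i : Int) == PySem.List.pyGet? l ((i : Int) + 1)) = true
    · rw [if_pos hc, if_pos hc]
      norm_num
      exact loopA_one l (i + 2)
    · rw [if_neg hc, if_neg hc]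
      norm_num
      exact loopA_zero l (i + 1)
  · simp [h]
termination_by l.length - i
decreasing_by omega

-- ===== VERDICT (by name: the statement is the Claim_ definition above) =====
theorem has_pairs_spec : Claim_equal_has_pairs := by
  intro s _
  unfold Spec_has_pairs has_pairs has_pairs_alt
  exact loopA_zero s.toList 0
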